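-- pv_equiv track=rewrite | github.com/l3p-cv/lost | backend/lost/pyapi/examples/pipes/sia/request_yolo_annos.py | get_sim_classes
-- ===== SOURCE A (Python) =====
-- def get_sim_classes(lbls, lbl_map):
--     res_list = []
--     for lbl in lbls:
--         if lbl not in lbl_map:
--             if lbl_map:
--                 new_id = max(lbl_map.values()) + 1
--             else:
--                 new_id = 0
--             lbl_map[lbl] = new_id
--         res_list.append(lbl_map[lbl])
--     return res_list
-- ===== SOURCE B (Python) =====
-- def get_sim_classes(lbls, lbl_map):
--     nxt = max(lbl_map.values()) + 1 if lbl_map else 0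
--     for lbl in lbls:
--         if lbl not in lbl_map:
--             lbl_map[lbl] = nxt
--             nxt += 1
--     return [lbl_map[lbl] for lbl in lbls]
-- ===== Notes on version B (the rewrite author's own statement) =====
-- stated objective: faster
-- what changed: Replaces the fused build-and-read loop that recomputes max(lbl_map.values()) at every insertion with a running counter seeded once from the initial map, a build-only first pass, and a separate lookup pass over the completed map.
import Mathlib
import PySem

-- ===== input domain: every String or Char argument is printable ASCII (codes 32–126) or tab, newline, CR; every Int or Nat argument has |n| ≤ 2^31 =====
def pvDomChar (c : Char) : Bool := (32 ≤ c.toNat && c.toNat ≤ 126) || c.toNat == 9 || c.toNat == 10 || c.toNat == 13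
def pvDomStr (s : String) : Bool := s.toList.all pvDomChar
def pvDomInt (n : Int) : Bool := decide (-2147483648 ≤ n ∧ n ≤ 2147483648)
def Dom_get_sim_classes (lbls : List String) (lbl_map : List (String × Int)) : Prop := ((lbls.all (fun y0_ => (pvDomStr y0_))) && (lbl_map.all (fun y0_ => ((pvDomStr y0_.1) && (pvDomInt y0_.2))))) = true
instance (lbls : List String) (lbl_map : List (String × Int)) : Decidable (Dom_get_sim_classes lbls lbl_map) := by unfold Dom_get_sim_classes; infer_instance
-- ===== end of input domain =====

-- B replaces A's per-insertion max(lbl_map.values()) recomputation by a running counter seeded once,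
-- and splits the fused build-and-read loop into a build pass plus a lookup pass (return value only;
-- like A, the Python B also mutates lbl_map in place, identically).

-- ===== PORT A =====
-- A's loop: fold over lbls carrying (dict, res_list); per unseen label, new id = max(values)+1 (or 0 if empty).
def get_sim_classes (lbls : List String) (lbl_map : List (String × Int)) : List Int :=
  (lbls.foldl
    (fun (st : PySem.Dict String Int × List Int) lbl =>
      let d :=
        if st.1.contains lbl then st.1
        else
          let new_id : Int :=
            if st.1.items.isEmpty then 0
            else (PySem.List.max? st.1.values (fun v => v)).getD 0 + 1
          st.1.insert lbl new_id
      (d, st.2 ++ [(d.get? lbl).getD 0]))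
    (PySem.Dict.mk lbl_map, [])).2

-- ===== PORT B =====
-- B's two passes: seed counter once, build-only fold, then a lookup map over the finished dict.
def get_sim_classes_alt (lbls : List String) (lbl_map : List (String × Int)) : List Int :=
  let d0 := PySem.Dict.mk lbl_map
  let nxt0 : Int :=
    if d0.items.isEmpty then 0
    else (PySem.List.max? d0.values (fun v => v)).getD 0 + 1
  let st := lbls.foldl
    (fun (st : PySem.Dict String Int × Int) lbl =>
      if st.1.contains lbl then st else (st.1.insert lbl st.2, st.2 + 1))
    (d0, nxt0)
  lbls.map (fun lbl => (st.1.get? lbl).getD 0)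

-- ===== PRECONDITION & SPEC =====
def Spec_get_sim_classes (lbls : List String) (lbl_map : List (String × Int)) (out : List Int) : Prop := out = get_sim_classes_alt lbls lbl_map
instance (lbls : List String) (lbl_map : List (String × Int)) (out : List Int) : Decidable (Spec_get_sim_classes lbls lbl_map out) := by unfold Spec_get_sim_classes; infer_instance

-- ===== CLAIM (what is proved, stated in full; the proofs are below) =====
def Claim_equal_get_sim_classes : Prop := ∀ (lbls : List String) (lbl_map : List (String × Int)), Dom_get_sim_classes lbls lbl_map → Spec_get_sim_classes lbls lbl_map (get_sim_classes lbls lbl_map)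

-- ===== LEMMAS AND PROOFS =====

-- loop invariant: the counter c is one past the max of the dict's values (and 0 on the empty dict)
def pvInv (d : PySem.Dict String Int) (c : Int) : Prop :=
  (d.items = [] → c = 0) ∧ (∀ v ∈ d.values, v ≤ c - 1) ∧
  (d.items ≠ [] → PySem.List.max? d.values (fun v => v) = some (c - 1))

lemma pvMax_append_last (l : List Int) (c : Int) (h : ∀ v ∈ l, v ≤ c - 1) :
    PySem.List.max? (l ++ [c]) (fun v => v) = some c := by
  cases l with
  | nil =>
    have : ([] : List Int) ++ [c] = c :: [] := rfl
    rw [this, PySem.List.max?_id_cons]; simp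
  | cons v0 vs =>
    have h1 : (v0 :: vs) ++ [c] = v0 :: (vs ++ [c]) := rfl
    rw [h1, PySem.List.max?_id_cons, List.foldl_append]
    simp only [List.foldl_cons, List.foldl_nil]
    have hle : vs.foldl max v0 ≤ c - 1 := by
      rcases PySem.List.foldl_max_mem vs v0 with h2 | h2
      · rw [h2]; exact h v0 (by simp)
      · exact h _ (by simp [h2])
    have : max (vs.foldl max v0) c = c := by omega
    rw [this]

lemma pvNewId_eq (d : PySem.Dict String Int) (c : Int) (hInv : pvInv d c) :
    (if d.items.isEmpty then (0 : Int)
     else (PySem.List.max? d.values (fun v => v)).getD 0 + 1) = c := by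
  obtain ⟨h0, _, hmax⟩ := hInv
  by_cases he : d.items = []
  · simp [he, h0 he]
  · rw [hmax he]
    simp [he]

lemma pvInv_insert (d : PySem.Dict String Int) (c : Int) (lbl : String)
    (hInv : pvInv d c) (hc : d.contains lbl = false) :
    pvInv (d.insert lbl c) (c + 1) := by
  obtain ⟨h0, hle, hmax⟩ := hInv
  have hitems := PySem.Dict.items_insert_of_not_contains d c hc
  have hvals : (d.insert lbl c).values = d.values ++ [c] := by
    simp [PySem.Dict.values, hitems]
  refine ⟨?_, ?_, ?_⟩
  · intro h; simp [hitems] at h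
  · intro v hv
    rw [hvals] at hv
    rcases List.mem_append.mp hv with h | h
    · have := hle v h; omega
    · simp at h; omega
  · intro _
    rw [hvals, pvMax_append_last d.values c hle]
    congr 1; omega

-- the main loop correspondence, by induction over lbls
lemma pvLoop (lbls : List String) :
    ∀ (d : PySem.Dict String Int) (c : Int) (res : List Int), pvInv d c →
    (lbls.foldl
      (fun (st : PySem.Dict String Int × List Int) lbl =>
        let d :=
          if st.1.contains lbl then st.1
          else
            let new_id : Int :=
              if st.1.items.isEmpty then 0
              else (PySem.List.max? st.1.values (fun v => v)).getD 0 + 1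
            st.1.insert lbl new_id
        (d, st.2 ++ [(d.get? lbl).getD 0])) (d, res)).1 =
      (lbls.foldl
        (fun (st : PySem.Dict String Int × Int) lbl =>
          if st.1.contains lbl then st else (st.1.insert lbl st.2, st.2 + 1)) (d, c)).1 ∧
    (lbls.foldl
      (fun (st : PySem.Dict String Int × List Int) lbl =>
        let d :=
          if st.1.contains lbl then st.1
          else
            let new_id : Int :=
              if st.1.items.isEmpty then 0
              else (PySem.List.max? st.1.values (fun v => v)).getD 0 + 1
            st.1.insert lbl new_id
        (d, st.2 ++ [(d.get? lbl).getD 0])) (d, res)).2 =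
      res ++ lbls.map (fun l =>
        (((lbls.foldl
          (fun (st : PySem.Dict String Int × Int) lbl =>
            if st.1.contains lbl then st else (st.1.insert lbl st.2, st.2 + 1)) (d, c)).1).get? l).getD 0) ∧
    (∀ k, d.contains k = true →
      ((lbls.foldl
        (fun (st : PySem.Dict String Int × Int) lbl =>
          if st.1.contains lbl then st else (st.1.insert lbl st.2, st.2 + 1)) (d, c)).1).get? k = d.get? k) := by
  induction lbls with
  | nil => intro d c res _; exact ⟨rfl, by simp, fun k _ => rfl⟩
  | cons l t ih =>
    intro d c res hInv
    by_cases hcon : d.contains l = true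
    · simp only [List.foldl_cons, if_pos hcon]
      obtain ⟨ha, hb, hmono⟩ := ih d c (res ++ [(d.get? l).getD 0]) hInv
      refine ⟨ha, ?_, hmono⟩
      rw [hb, List.map_cons]
      have : ((((t.foldl
          (fun (st : PySem.Dict String Int × Int) lbl =>
            if st.1.contains lbl then st else (st.1.insert lbl st.2, st.2 + 1)) (d, c)).1).get? l).getD 0)
          = (d.get? l).getD 0 := by rw [hmono l hcon]
      rw [this]; simp
    · have hcon' : d.contains l = false := by simpa using hcon
      have hconP : ¬ d.contains l = true := by simp [hcon']
      simp only [List.foldl_cons, if_neg hconP]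
      have hid := pvNewId_eq d c hInv
      simp only [hid]
      have hInv' := pvInv_insert d c l hInv hcon'
      have hlook : ((d.insert l c).get? l).getD 0 = c := by
        rw [PySem.Dict.get?_insert_self]; rfl
      obtain ⟨ha, hb, hmono⟩ := ih (d.insert l c) (c + 1) (res ++ [((d.insert l c).get? l).getD 0]) hInv'
      refine ⟨ha, ?_, ?_⟩
      · rw [hb, List.map_cons]
        have hconl : (d.insert l c).contains l = true := PySem.Dict.contains_insert_self d l c
        have : ((((t.foldl
            (fun (st : PySem.Dict String Int × Int) lbl =>
              if st.1.contains lbl then st else (st.1.insert lbl st.2, st.2 + 1)) (d.insert l c, c + 1)).1).get? l).getD 0)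
            = ((d.insert l c).get? l).getD 0 := by rw [hmono l hconl]
        rw [this]; simp
      · intro k hk
        have hne : k ≠ l := by
          intro h; rw [h] at hk; rw [hk] at hcon'; cases hcon'
        have hk' : (d.insert l c).contains k = true := by
          rw [PySem.Dict.contains_insert]; simp [hk]
        rw [hmono k hk', PySem.Dict.get?_insert_of_ne d c hne]

lemma pvInv_init (lbl_map : List (String × Int)) :
    pvInv (PySem.Dict.mk lbl_map)
      (if (PySem.Dict.mk lbl_map).items.isEmpty then 0
       else (PySem.List.max? (PySem.Dict.mk lbl_map).values (fun v => v)).getD 0 + 1) := by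
  set d := PySem.Dict.mk lbl_map with hd
  by_cases he : d.items = []
  · refine ⟨fun _ => by simp [he], ?_, fun h => absurd he h⟩
    intro v hv
    have : d.values = [] := by simp [PySem.Dict.values, he]
    rw [this] at hv; cases hv
  · have hvne : d.values ≠ [] := by
      simp [PySem.Dict.values]; exact he
    obtain ⟨m, hm⟩ : ∃ m, PySem.List.max? d.values (fun v => v) = some m := by
      cases hmx : PySem.List.max? d.values (fun v => v) with
      | none => exact absurd ((PySem.List.max?_eq_none_iff d.values (fun v => v)).mp hmx) hvne
      | some m => exact ⟨m, rfl⟩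
    have hie : d.items.isEmpty = false := by simp [he]
    refine ⟨fun h => absurd h he, ?_, ?_⟩
    · intro v hv
      have := PySem.List.max?_isMax hm v hv
      simp [hie, hm]
      omega
    · intro _
      rw [hm]
      simp [hie]

-- ===== VERDICT (by name: the statement is the Claim_ definition above) =====
theorem get_sim_classes_spec : Claim_equal_get_sim_classes := by
  intro lbls lbl_map _
  unfold Spec_get_sim_classes get_sim_classes get_sim_classes_alt
  obtain ⟨_, hb, _⟩ := pvLoop lbls (PySem.Dict.mk lbl_map)
    (if (PySem.Dict.mk lbl_map).items.isEmpty then 0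
     else (PySem.List.max? (PySem.Dict.mk lbl_map).values (fun v => v)).getD 0 + 1)
    [] (pvInv_init lbl_map)
  simpa using hb
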